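-- pv_equiv track=rewrite | github.com/ethanstanley/Othello-AI | othelloAI.py | changeBoard
-- ===== SOURCE A (Python) =====
-- CONSTRAINTS = [[[0, 1, 2, 3, 4, 5, 6, 7], [8, 9, 10, 11, 12, 13, 14, 15], [16, 17, 18, 19, 20, 21, 22, 23], [24, 25, 26, 27, 28, 29, 30, 31], [32, 33, 34, 35, 36, 37, 38, 39], [40, 41, 42, 43, 44, 45, 46, 47], [48, 49, 50, 51, 52, 53, 54, 55], [56, 57, 58, 59, 60, 61, 62, 63]], [[0, 8, 16, 24, 32, 40, 48, 56], [1, 9, 17, 25, 33, 41, 49, 57], [2, 10, 18, 26, 34, 42, 50, 58], [3, 11, 19, 27, 35, 43, 51, 59], [4, 12, 20, 28, 36, 44, 52, 60], [5, 13, 21, 29, 37, 45, 53, 61], [6, 14, 22, 30, 38, 46, 54, 62], [7, 15, 23, 31, 39, 47, 55, 63]], [[2, 9, 16], [3, 10, 17, 24], [4, 11, 18, 25, 32], [5, 12, 19, 26, 33, 40], [6, 13, 20, 27, 34, 41, 48], [7, 14, 21, 28, 35, 42, 49, 56], [57, 50, 43, 36, 29, 22, 15], [58, 51, 44, 37, 30,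 23], [59, 52, 45, 38, 31], [60, 53, 46, 39], [61, 54, 47]], [[0, 9, 18, 27, 36, 45, 54, 63], [1, 10, 19, 28, 37, 46, 55], [2, 11, 20, 29, 38, 47], [3, 12, 21, 30, 39], [4, 13, 22, 31], [5, 14, 23], [58, 49, 40], [59, 50, 41, 32], [60, 51, 42, 33, 24], [61, 52, 43, 34, 25, 16], [62, 53, 44, 35, 26, 17, 8]]]
--
-- def changeBoard(board, token, position):
--     indiciesToChange = [position]
--     optoken = 'X' if token == "O" else "O"
--     for constraint in CONSTRAINTS:
--         for c in constraint:
--             if position in c: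
--                 i = c.index(position)
--                 oploc = []
--                 for nindex in range(i + 1, len(c)):
--                     if board[c[nindex]] == '.':break
--                     elif board[c[nindex]] == optoken: oploc.append(c[nindex])
--                     else:
--                         indiciesToChange = indiciesToChange + oploc
--                         break
--                 oploc = []
--                 for nindex in range(i - 1, -1, -1):
--                     if board[c[nindex]] == '.': break
--                     elif board[c[nindex]] == optoken: oploc.append(c[nindex])
--                     else:
--                         indiciesToChange = indiciesToChange + oploc
--                         break
--
--     for thing in indiciesToChange:
--         board = board[:thing] + token + board[thing + 1:]
--     return board
-- ===== SOURCE B (Python) =====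
-- def changeBoard(board, token, position):
--     optoken = 'X' if token == "O" else "O"
--     flips = []
--     if 0 <= position < 64:
--         row, col = divmod(position, 8)
--         for dr in (-1, 0, 1):
--             for dc in (-1, 0, 1):
--                 if dr == 0 and dc == 0:
--                     continue
--                 r, c = row + dr, col + dc
--                 captured = []
--                 while 0 <= r < 8 and 0 <= c < 8:
--                     cell = board[8 * r + c]
--                     if cell == '.':
--                         break
--                     if cell == optoken:
--                         captured.append(8 * r + c)
--                         r += dr
--                         c += dc
--                     else:
--                         flips.extend(captured)
--                         break
--     for i in [position] + flips:
--         board = board[:i] + token + board[i + 1:]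
--     return board
-- ===== Notes on version B (the rewrite author's own statement) =====
-- stated objective: alternative
-- what changed: B replaces A's four hard-coded CONSTRAINTS index tables and their per-line index()/range scans by an arithmetic walk from divmod(position, 8) over the 8 direction deltas, guarded to on-board positions.
import Mathlib
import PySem

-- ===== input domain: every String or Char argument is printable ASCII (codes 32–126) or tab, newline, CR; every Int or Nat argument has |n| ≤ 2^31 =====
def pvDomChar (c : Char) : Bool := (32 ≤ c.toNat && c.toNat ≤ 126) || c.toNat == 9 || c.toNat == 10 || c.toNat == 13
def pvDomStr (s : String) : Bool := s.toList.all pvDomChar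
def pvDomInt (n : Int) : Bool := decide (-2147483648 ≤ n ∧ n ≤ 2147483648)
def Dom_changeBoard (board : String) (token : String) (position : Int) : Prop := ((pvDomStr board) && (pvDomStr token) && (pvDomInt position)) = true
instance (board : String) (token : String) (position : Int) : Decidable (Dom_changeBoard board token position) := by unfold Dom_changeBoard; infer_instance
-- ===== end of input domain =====

-- B replaces A's four hard-coded CONSTRAINTS tables and their index scans by an arithmetic
-- walk over the 8 direction deltas from divmod(position, 8) (objective: alternative/idiomatic).

-- ===== PORT A =====
def pvConstraints : List (List (List Int)) := [[[0, 1, 2, 3, 4, 5, 6, 7], [8, 9, 10, 11, 12, 13, 14, 15], [16, 17, 18, 19, 20, 21, 22, 23], [24, 25, 26, 27, 28, 29, 30, 31], [32, 33, 34, 35, 36, 37, 38, 39], [40, 41, 42, 43, 44, 45, 46, 47], [48, 49, 50, 51, 52, 53, 54, 55], [56, 57, 58, 59, 60, 61, 62, 63]], [[0, 8, 16, 24, 32, 40, 48, 56], [1, 9, 17, 25, 33, 41, 49, 57], [2, 10, 18, 26, 34, 42, 50, 58], [3, 11, 19, 27, 35, 43, 51, 59], [4, 12, 20, 28, 36, 44,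 52, 60], [5, 13, 21, 29, 37, 45, 53, 61], [6, 14, 22, 30, 38, 46, 54, 62], [7, 15, 23, 31, 39, 47, 55, 63]], [[2, 9, 16], [3, 10, 17, 24], [4, 11, 18, 25, 32], [5, 12, 19, 26, 33, 40], [6, 13, 20, 27, 34, 41, 48], [7, 14, 21, 28, 35, 42, 49, 56], [57, 50, 43, 36, 29, 22, 15], [58, 51, 44, 37, 30, 23], [59, 52, 45, 38, 31], [60, 53, 46, 39], [61, 54, 47]], [[0, 9, 18, 27, 36, 45, 54, 63], [1, 10, 19, 28, 37, 46, 55], [2, 11, 20, 29, 38, 47], [3, 12, 21, 30, 39], [4, 13, 22, 31], [5, 14, 23], [58, 49, 40], [59, 50, 41, 32], [60, 51, 42, 33, 24], [61, 52, 43, 34, 25, 16], [62, 53, 44, 35, 26, 17, 8]]]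

-- one of A's two inner 'for nindex in range(...)' scan loops (both have the same body, over a
-- different index range); returns the 'oploc' list that the loop's else-branch appends to
-- indiciesToChange, or [] when the loop breaks on '.' / runs off the line.
def pvScanLoop (board : String) (optoken : String) (c : List Int) : List Int → List Int → List Int
  | [], _ => []
  | n :: rest, oploc =>
    match PySem.Str.pyGet? board (PySem.List.pyGetD c n 0) with
    | none => []          -- board[c[nindex]] raises IndexError in Python; excluded by Pre_
    | some ch =>
      if String.ofList [ch] == "." then []
      else if String.ofList [ch] == optoken then
        pvScanLoop board optoken c rest (oploc ++ [PySem.List.pyGetD c n 0])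
      else oploc

def changeBoard (board : String) (token : String) (position : Int) : String :=
  let optoken : String := if token == "O" then "X" else "O"
  let indiciesToChange :=
    pvConstraints.foldl (fun acc constraint =>
      constraint.foldl (fun acc c =>
        if position ∈ c then
          let i : Int := (((PySem.List.index? c position).getD 0 : Nat) : Int)
          (acc ++ pvScanLoop board optoken c (PySem.List.pyRange (i + 1) (PySem.List.len c) 1) [])
            ++ pvScanLoop board optoken c (PySem.List.pyRange (i - 1) (-1) (-1)) []
        else acc) acc) [position]
  indiciesToChange.foldl (fun b thing =>
    PySem.Str.slice b none (some thing) ++ token ++ PySem.Str.slice b (some (thing + 1)) none) board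

-- ===== PORT B =====
-- B's while loop along one direction; fuel 9 bounds it (any ray meets at most 8 in-bounds cells,
-- and the loop stops as soon as (r,c) leaves the 8x8 board).
def pvWalk (board : String) (optoken : String) (dr : Int) (dc : Int) : Nat → Int → Int → List Int → List Int
  | 0, _, _, _ => []
  | fuel + 1, r, c, captured =>
    if 0 ≤ r ∧ r < 8 ∧ 0 ≤ c ∧ c < 8 then
      match PySem.Str.pyGet? board (8 * r + c) with
      | none => []        -- board[8*r+c] raises IndexError in Python; excluded by Pre_
      | some ch =>
        if String.ofList [ch] == "." then []
        else if String.ofList [ch] == optoken then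
          pvWalk board optoken dr dc fuel (r + dr) (c + dc) (captured ++ [8 * r + c])
        else captured
    else []

def changeBoard_alt (board : String) (token : String) (position : Int) : String :=
  let optoken : String := if token == "O" then "X" else "O"
  let flips : List Int :=
    if 0 ≤ position ∧ position < 64 then
      [(-1 : Int), 0, 1].foldl (fun flips dr =>
        [(-1 : Int), 0, 1].foldl (fun flips dc =>
          if dr = 0 ∧ dc = 0 then flips
          else flips ++ pvWalk board optoken dr dc 9
            (PySem.Int.floordiv position 8 + dr) (PySem.Int.mod position 8 + dc) []) flips) []
    else []
  (position :: flips).foldl (fun b thing =>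
    PySem.Str.slice b none (some thing) ++ token ++ PySem.Str.slice b (some (thing + 1)) none) board

-- ===== PRECONDITION & SPEC =====
-- Pre_ requires, for an on-board position (0 ≤ position < 64), the natural Othello shape:
-- a 64-character board and a one-character token (A reads board cells up to index 63 there, and
-- with a longer token A's repeated splicing shifts later flip indices — an accident of its
-- implementation; see the cites in claim.json). Off-board positions make A read nothing and
-- are admitted unrestricted.
def Pre_changeBoard (board : String) (token : String) (position : Int) : Prop :=
  0 ≤ position ∧ position < 64 → board.toList.length = 64 ∧ token.toList.length = 1
instance (board : String) (token : String) (position : Int) : Decidable (Pre_changeBoard board token position) := by unfold Pre_changeBoard; infer_instance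

def pvWitness_changeBoard : String × String × Int :=
  ("...........................OX......XO...........................", "X", 19)

def Spec_changeBoard (board : String) (token : String) (position : Int) (out : String) : Prop := out = changeBoard_alt board token position
instance (board : String) (token : String) (position : Int) (out : String) : Decidable (Spec_changeBoard board token position out) := by unfold Spec_changeBoard; infer_instance

-- ===== CLAIM (what is proved, stated in full; the proofs are below) =====
def Claim_equal_changeBoard : Prop := ∀ (board : String) (token : String) (position : Int), Dom_changeBoard board token position → Pre_changeBoard board token position → Spec_changeBoard board token position (changeBoard board token position)

-- ===== LEMMAS AND PROOFS =====

-- the common shape of both scan loops: walk a list of cell indices, read the board there,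
-- stop on '.', accumulate opponent cells, flush them on any other character.
def pvScanCells (board : String) (optoken : String) : List Int → List Int → List Int
  | [], _ => []
  | cell :: rest, oploc =>
    match PySem.Str.pyGet? board cell with
    | none => []
    | some ch =>
      if String.ofList [ch] == "." then []
      else if String.ofList [ch] == optoken then
        pvScanCells board optoken rest (oploc ++ [cell])
      else oploc

-- the in-bounds cells met by B's walk, independent of the board
def pvRay : Nat → Int → Int → Int → Int → List Int
  | 0, _, _, _, _ => []
  | fuel + 1, r, c, dr, dc =>
    if 0 ≤ r ∧ r < 8 ∧ 0 ≤ c ∧ c < 8 then (8 * r + c) :: pvRay fuel (r + dr) (c + dc) dr dc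
    else []

-- the cell lists A's scan loops traverse, per constraint line containing position
def pvRaysA (position : Int) : List (List Int) :=
  pvConstraints.flatMap (fun constraint => constraint.flatMap (fun c =>
    if position ∈ c then
      [(PySem.List.pyRange ((((PySem.List.index? c position).getD 0 : Nat) : Int) + 1) (PySem.List.len c) 1).map
          (fun n => PySem.List.pyGetD c n 0),
       (PySem.List.pyRange ((((PySem.List.index? c position).getD 0 : Nat) : Int) - 1) (-1) (-1)).map
          (fun n => PySem.List.pyGetD c n 0)]
    else []))

def pvDirs : List (Int × Int) := [(-1, -1), (-1, 0), (-1, 1), (0, -1), (0, 1), (1, -1), (1, 0), (1, 1)]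

def pvRaysB (position : Int) : List (List Int) :=
  pvDirs.map (fun d => pvRay 9 (PySem.Int.floordiv position 8 + d.1) (PySem.Int.mod position 8 + d.2) d.1 d.2)

def pvPaint (bl : List Char) (t : Char) (L : List Int) : List Char :=
  bl.mapIdx (fun i ch => if (i : Int) ∈ L then t else ch)

lemma pvScanLoop_eq (board optoken : String) (c : List Int) :
    ∀ (ns : List Int) (oploc : List Int),
      pvScanLoop board optoken c ns oploc
        = pvScanCells board optoken (ns.map (fun n => PySem.List.pyGetD c n 0)) oploc := by
  intro ns
  induction ns with
  | nil => intro oploc; rfl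
  | cons n rest ih =>
    intro oploc
    simp only [pvScanLoop, List.map_cons, pvScanCells]
    cases PySem.Str.pyGet? board (PySem.List.pyGetD c n 0) with
    | none => rfl
    | some ch =>
      simp only []
      split_ifs <;> simp [ih]

lemma pvWalk_eq (board optoken : String) (dr dc : Int) :
    ∀ (fuel : Nat) (r c : Int) (captured : List Int),
      pvWalk board optoken dr dc fuel r c captured
        = pvScanCells board optoken (pvRay fuel r c dr dc) captured := by
  intro fuel
  induction fuel with
  | zero => intro r c captured; rfl
  | succ fuel ih =>
    intro r c captured
    simp only [pvWalk, pvRay]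
    split_ifs with h
    · simp only [pvScanCells]
      cases PySem.Str.pyGet? board (8 * r + c) with
      | none => rfl
      | some ch => simp only []; split_ifs <;> simp [ih]
    · rfl

lemma pvScanCells_short (board optoken : String) (l : List Int) (h : l.length ≤ 1) :
    pvScanCells board optoken l [] = [] := by
  match l with
  | [] => rfl
  | [cell] =>
    simp only [pvScanCells]
    cases PySem.Str.pyGet? board cell with
    | none => rfl
    | some ch => simp only []; split_ifs <;> rfl
  | a :: b :: t => simp at h

lemma pvScanCells_subset (board optoken : String) :
    ∀ (l : List Int) (oploc : List Int) (x : Int),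
      x ∈ pvScanCells board optoken l oploc → x ∈ oploc ∨ x ∈ l := by
  intro l
  induction l with
  | nil => intro oploc x hx; simp [pvScanCells] at hx
  | cons cell rest ih =>
    intro oploc x hx
    simp only [pvScanCells] at hx
    cases hg : PySem.Str.pyGet? board cell with
    | none => rw [hg] at hx; simp at hx
    | some ch =>
      rw [hg] at hx
      simp only [] at hx
      split_ifs at hx with h1 h2
      · simp at hx
      · rcases ih _ _ hx with h | h
        · rcases List.mem_append.1 h with h | h
          · exact Or.inl h
          · simp at h; simp [h]
        · simp [h]
      · simp [hx]

lemma pvRay_bound : ∀ (fuel : Nat) (r c dr dc : Int) (x : Int),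
    x ∈ pvRay fuel r c dr dc → 0 ≤ x ∧ x < 64 := by
  intro fuel
  induction fuel with
  | zero => intro r c dr dc x hx; simp [pvRay] at hx
  | succ fuel ih =>
    intro r c dr dc x hx
    simp only [pvRay] at hx
    split_ifs at hx with h
    · rcases List.mem_cons.1 hx with rfl | hx
      · omega
      · exact ih _ _ _ _ _ hx
    · simp at hx

-- A's nested constraint fold produces [position] followed by the scans of pvRaysA in order
lemma pvIdxsA_eq (board optoken : String) (position : Int) :
    (pvConstraints.foldl (fun acc constraint =>
      constraint.foldl (fun acc c =>
        if position ∈ c then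
          (acc ++ pvScanLoop board optoken c (PySem.List.pyRange ((((PySem.List.index? c position).getD 0 : Nat) : Int) + 1) (PySem.List.len c) 1) [])
            ++ pvScanLoop board optoken c (PySem.List.pyRange ((((PySem.List.index? c position).getD 0 : Nat) : Int) - 1) (-1) (-1)) []
        else acc) acc) [position])
    = position :: (pvRaysA position).flatMap (fun l => pvScanCells board optoken l []) := by
  have hinner : ∀ (L : List (List Int)) (acc : List Int),
      L.foldl (fun acc c =>
        if position ∈ c then
          (acc ++ pvScanLoop board optoken c (PySem.List.pyRange ((((PySem.List.index? c position).getD 0 : Nat) : Int) + 1) (PySem.List.len c) 1) [])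
            ++ pvScanLoop board optoken c (PySem.List.pyRange ((((PySem.List.index? c position).getD 0 : Nat) : Int) - 1) (-1) (-1)) []
        else acc) acc
      = acc ++ L.flatMap (fun c =>
          if position ∈ c then
            pvScanLoop board optoken c (PySem.List.pyRange ((((PySem.List.index? c position).getD 0 : Nat) : Int) + 1) (PySem.List.len c) 1) []
              ++ pvScanLoop board optoken c (PySem.List.pyRange ((((PySem.List.index? c position).getD 0 : Nat) : Int) - 1) (-1) (-1)) []
          else []) := by
    intro L acc
    rw [← PySem.List.foldl_append_eq_flatMap]
    apply PySem.List.foldl_congr_mem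
    intro acc' c _
    split_ifs with h
    · rw [List.append_assoc]
    · simp
  have houter := PySem.List.foldl_append_eq_flatMap
    (fun constraint => constraint.flatMap (fun c =>
      if position ∈ c then
        pvScanLoop board optoken c (PySem.List.pyRange ((((PySem.List.index? c position).getD 0 : Nat) : Int) + 1) (PySem.List.len c) 1) []
          ++ pvScanLoop board optoken c (PySem.List.pyRange ((((PySem.List.index? c position).getD 0 : Nat) : Int) - 1) (-1) (-1)) []
      else [])) pvConstraints [position]
  refine ((PySem.List.foldl_congr_mem _ _ _ _ (fun acc constraint _ => hinner constraint acc)).trans houter).trans ?_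
  simp only [List.singleton_append, pvRaysA, List.flatMap_assoc]
  congr 1
  refine List.flatMap_congr ?_
  intro constraint _
  refine List.flatMap_congr ?_
  intro c _
  split_ifs with h
  · simp [pvScanLoop_eq]
  · simp

-- the decidable geometric core: every scan line of A of length ≥ 2 is one of B's rays and
-- conversely (the rays missing from A's CONSTRAINTS tables have length ≤ 1)
lemma pvC : ∀ p : Fin 64,
    ((pvRaysA (p.val : Int)).all (fun l => decide (l.length ≤ 1) || decide (l ∈ pvRaysB (p.val : Int)))
      && (pvRaysB (p.val : Int)).all (fun l => decide (l.length ≤ 1) || decide (l ∈ pvRaysA (p.val : Int)))) = true := by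
  decide

lemma pvFlat_iff (board optoken : String) (R1 R2 : List (List Int))
    (h1 : ∀ l ∈ R1, l.length ≤ 1 ∨ l ∈ R2) (h2 : ∀ l ∈ R2, l.length ≤ 1 ∨ l ∈ R1) (x : Int) :
    x ∈ R1.flatMap (fun l => pvScanCells board optoken l [])
      ↔ x ∈ R2.flatMap (fun l => pvScanCells board optoken l []) := by
  simp only [List.mem_flatMap]
  constructor
  · rintro ⟨l, hl, hx⟩
    rcases h1 l hl with h | h
    · rw [pvScanCells_short board optoken l h] at hx; simp at hx
    · exact ⟨l, h, hx⟩
  · rintro ⟨l, hl, hx⟩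
    rcases h2 l hl with h | h
    · rw [pvScanCells_short board optoken l h] at hx; simp at hx
    · exact ⟨l, h, hx⟩

lemma pvMapIdx_id (bl : List Char) : (bl.mapIdx fun _ ch => ch) = bl := by
  induction bl with
  | nil => rfl
  | cons a l ih => simp [List.mapIdx_cons]; exact ih

lemma pvPaint_set (bl : List Char) (t : Char) (L : List Int) (a : Int)
    (h0 : 0 ≤ a) (_h1 : a.toNat < bl.length) :
    pvPaint (bl.set a.toNat t) t L = pvPaint bl t (a :: L) := by
  apply List.ext_getElem
  · simp [pvPaint]
  · intro i hi hi'
    simp only [pvPaint, List.getElem_mapIdx, List.getElem_set, List.mem_cons]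
    by_cases hm : (i : Int) ∈ L <;> by_cases he : a.toNat = i <;>
      simp [hm, he, (show ((i : Int) = a) ↔ a.toNat = i by omega)]

lemma pvSpliceFold_eq (token : String) (t : Char) (htok : token.toList = [t]) :
    ∀ (L : List Int) (bl : List Char), bl.length = 64 → (∀ x ∈ L, 0 ≤ x ∧ x < 64) →
      L.foldl (fun b thing =>
          PySem.Str.slice b none (some thing) ++ token ++ PySem.Str.slice b (some (thing + 1)) none)
        (String.ofList bl)
        = String.ofList (pvPaint bl t L) := by
  intro L
  induction L with
  | nil =>
    intro bl _ _
    simp [pvPaint, pvMapIdx_id]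
  | cons a L ih =>
    intro bl hlen hbnd
    obtain ⟨ha0, ha1⟩ := hbnd a (by simp)
    have hstep : PySem.Str.slice (String.ofList bl) none (some a) ++ token
        ++ PySem.Str.slice (String.ofList bl) (some (a + 1)) none
        = String.ofList (bl.set a.toNat t) := by
      apply String.toList_inj.mp
      simp only [String.toList_append, PySem.Str.slice, PySem.Chars.slice, htok,
        String.toList_ofList]
      rw [PySem.List.slice_to _ ha0, PySem.List.slice_from _ (by omega)]
      have hto : (a + 1).toNat = a.toNat + 1 := by omega
      rw [hto, List.set_eq_take_cons_drop t (by omega)]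
      simp
    rw [List.foldl_cons, hstep, ih (bl.set a.toNat t) (by simp [hlen])
      (fun x hx => hbnd x (List.mem_cons_of_mem _ hx)), pvPaint_set bl t L a ha0 (by omega)]

lemma pvConstraintsBound :
    ∀ c0 ∈ pvConstraints, ∀ c ∈ c0, ∀ x ∈ c, 0 ≤ x ∧ x < 64 := by
  decide

lemma pvFlipsList_mem (board optoken : String) (position x : Int) :
    (x ∈ [(-1 : Int), 0, 1].foldl (fun flips dr =>
        [(-1 : Int), 0, 1].foldl (fun flips dc =>
          if dr = 0 ∧ dc = 0 then flips
          else flips ++ pvWalk board optoken dr dc 9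
            (PySem.Int.floordiv position 8 + dr) (PySem.Int.mod position 8 + dc) []) flips)
      ([] : List Int))
    ↔ x ∈ (pvRaysB position).flatMap (fun l => pvScanCells board optoken l []) := by
  simp only [List.foldl_cons, List.foldl_nil]
  norm_num
  simp only [pvWalk_eq, pvRaysB, pvDirs, List.map_cons]
  norm_num

-- ===== VERDICT (by name: the statement is the Claim_ definition above) =====
theorem changeBoard_spec : Claim_equal_changeBoard := by
  unfold Claim_equal_changeBoard Spec_changeBoard
  intro board token position _ hpre
  unfold changeBoard changeBoard_alt
  simp only []
  rw [pvIdxsA_eq board (if token == "O" then "X" else "O") position]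
  by_cases hon : 0 ≤ position ∧ position < 64
  · obtain ⟨hb, ht⟩ := hpre hon
    obtain ⟨hp0, hp1⟩ := hon
    rw [if_pos (⟨hp0, hp1⟩ : 0 ≤ position ∧ position < 64)]
    obtain ⟨t, htok⟩ : ∃ t, token.toList = [t] := List.length_eq_one_iff.mp ht
    have hpC := pvC ⟨position.toNat, by omega⟩
    simp only [Bool.and_eq_true, List.all_eq_true, Bool.or_eq_true, decide_eq_true_eq] at hpC
    rw [show ((position.toNat : Nat) : Int) = position from Int.toNat_of_nonneg hp0] at hpC
    obtain ⟨hA, hB⟩ := hpC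
    set optoken : String := if (token == "O") = true then "X" else "O" with hop
    set Fb : List Int := List.foldl (fun flips dr =>
        List.foldl (fun flips dc =>
            if dr = 0 ∧ dc = 0 then flips
            else flips ++ pvWalk board optoken dr dc 9
              (PySem.Int.floordiv position 8 + dr) (PySem.Int.mod position 8 + dc) [])
          flips [-1, 0, 1]) [] [-1, 0, 1] with hFb
    have hmemB : ∀ y : Int, y ∈ Fb ↔ y ∈ (pvRaysB position).flatMap
        (fun l => pvScanCells board optoken l []) := fun y =>
      pvFlipsList_mem board optoken position y
    have hbndB' : ∀ y ∈ (pvRaysB position).flatMap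
        (fun l => pvScanCells board optoken l []), 0 ≤ y ∧ y < 64 := by
      intro y hy
      obtain ⟨l, hl, hyl⟩ := List.mem_flatMap.1 hy
      unfold pvRaysB at hl
      obtain ⟨d, _, rfl⟩ := List.mem_map.1 hl
      rcases pvScanCells_subset board optoken _ _ _ hyl with h | h
      · simp at h
      · exact pvRay_bound _ _ _ _ _ _ h
    have hbndA : ∀ y ∈ position :: (pvRaysA position).flatMap
        (fun l => pvScanCells board optoken l []), 0 ≤ y ∧ y < 64 := by
      intro y hy
      rcases List.mem_cons.1 hy with rfl | hy
      · exact ⟨hp0, hp1⟩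
      · exact hbndB' y ((pvFlat_iff board optoken _ _ hA hB y).mp hy)
    have hbndB : ∀ y ∈ position :: Fb, 0 ≤ y ∧ y < 64 := by
      intro y hy
      rcases List.mem_cons.1 hy with rfl | hy
      · exact ⟨hp0, hp1⟩
      · exact hbndB' y ((hmemB y).mp hy)
    have hsA := pvSpliceFold_eq token t htok
      (position :: (pvRaysA position).flatMap (fun l => pvScanCells board optoken l []))
      board.toList hb hbndA
    have hsB := pvSpliceFold_eq token t htok (position :: Fb) board.toList hb hbndB
    rw [String.ofList_toList] at hsA hsB
    rw [hsA, hsB]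
    unfold pvPaint
    have hfn : (fun (i : Nat) (ch : Char) =>
          if (i : Int) ∈ position :: (pvRaysA position).flatMap
              (fun l => pvScanCells board optoken l []) then t else ch)
        = (fun (i : Nat) (ch : Char) => if (i : Int) ∈ position :: Fb then t else ch) := by
      funext i ch
      refine if_congr ?_ rfl rfl
      rw [List.mem_cons, List.mem_cons]
      exact or_congr Iff.rfl ((pvFlat_iff board optoken _ _ hA hB i).trans (hmemB i).symm)
    rw [hfn]
  · rw [if_neg hon]
    have hray : pvRaysA position = [] := by
      unfold pvRaysA
      rw [List.flatMap_congr (g := fun _ => ([] : List (List Int))) ?_]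
      · simp
      · intro c0 hc0
        rw [List.flatMap_congr (g := fun _ => ([] : List (List Int))) ?_]
        · simp
        · intro c hc
          rw [if_neg]
          intro hmem
          exact hon ⟨(pvConstraintsBound c0 hc0 c hc position hmem).1,
            (pvConstraintsBound c0 hc0 c hc position hmem).2⟩
    rw [hray]
    rfl
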